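-- pv_equiv track=rewrite | github.com/Yevhen-Yezerskyy/mailer-app | engine/core_validate/queue_builder.py | _top_k_pairs
-- ===== SOURCE A (Python) =====
-- import heapq
-- from typing import Dict, List, Optional, Tuple
--
-- PlzRate = Tuple[int, str]        # (city_rate, plz)
--
-- BranchRate = Tuple[int, int]     # (branch_rate, branch_id)
--
-- Pair = Tuple[str, int, int]      # (plz, branch_id, score)
--
-- def _top_k_pairs(plz_rates: List[PlzRate], branch_rates: List[BranchRate], k: int) -> List[Pair]:
--     if not plz_rates or not branch_rates or k <= 0:
--         return []
--
--     outer_is_branch = len(branch_rates) <= len(plz_rates)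
--     outer = branch_rates if outer_is_branch else plz_rates
--     inner = plz_rates if outer_is_branch else branch_rates
--
--     h: List[Tuple[int, str, int, int, int]] = []
--     for i, (orate, oid) in enumerate(outer):
--         irate0, iid0 = inner[0]
--         if outer_is_branch:
--             plz = str(iid0)
--             branch_id = int(oid)
--         else:
--             plz = str(oid)
--             branch_id = int(iid0)
--         score = int(orate) * int(irate0)
--         heapq.heappush(h, (score, plz, branch_id, i, 0))
--
--     out: List[Pair] = []
--     while h and len(out) < k:
--         score, plz, branch_id, i, j = heapq.heappop(h)
--         out.append((str(plz), int(branch_id), int(score)))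
--
--         j2 = j + 1
--         if j2 < len(inner):
--             orate, oid = outer[i]
--             irate2, iid2 = inner[j2]
--             if outer_is_branch:
--                 plz2 = str(iid2)
--                 branch_id2 = int(oid)
--             else:
--                 plz2 = str(oid)
--                 branch_id2 = int(iid2)
--             score2 = int(orate) * int(irate2)
--             heapq.heappush(h, (score2, plz2, branch_id2, i, j2))
--
--     return out
-- ===== SOURCE B (Python) =====
-- def _top_k_pairs(plz_rates, branch_rates, k):
--     if not plz_rates or not branch_rates or k <= 0:
--         return []
--
--     outer_is_branch = len(branch_rates) <= len(plz_rates)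
--     outer = branch_rates if outer_is_branch else plz_rates
--     inner = plz_rates if outer_is_branch else branch_rates
--
--     # one live candidate tuple per not-yet-exhausted outer index (no heap)
--     cands = []
--     for i, (orate, oid) in enumerate(outer):
--         irate0, iid0 = inner[0]
--         if outer_is_branch:
--             plz, branch_id = str(iid0), int(oid)
--         else:
--             plz, branch_id = str(oid), int(iid0)
--         cands.append((int(orate) * int(irate0), plz, branch_id, i, 0))
--
--     out = []
--     while cands and len(out) < k:
--         # linear scan for the minimum candidate by the full tuple key
--         t = 0
--         for idx, c in enumerate(cands):
--             if c < cands[t]: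
--                 t = idx
--         score, plz, branch_id, i, j = cands[t]
--         out.append((str(plz), int(branch_id), int(score)))
--
--         j2 = j + 1
--         if j2 < len(inner):
--             orate, oid = outer[i]
--             irate2, iid2 = inner[j2]
--             if outer_is_branch:
--                 plz2, branch_id2 = str(iid2), int(oid)
--             else:
--                 plz2, branch_id2 = str(oid), int(iid2)
--             cands[t] = (int(orate) * int(irate2), plz2, branch_id2, i, j2)
--         else:
--             cands.pop(t)
--     return out
-- ===== Notes on version B (the rewrite author's own statement) =====
-- stated objective: alternative
-- what changed: Replaces A's binary heap (heapq push/pop with sift-up/sift-down) by a flat list holding one live candidate tuple per unexhausted outer index; each of the up-to-k extractions does a linear scan for the minimum candidate by the full tuple key and then replaces or drops that slot in place.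
import Mathlib
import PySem

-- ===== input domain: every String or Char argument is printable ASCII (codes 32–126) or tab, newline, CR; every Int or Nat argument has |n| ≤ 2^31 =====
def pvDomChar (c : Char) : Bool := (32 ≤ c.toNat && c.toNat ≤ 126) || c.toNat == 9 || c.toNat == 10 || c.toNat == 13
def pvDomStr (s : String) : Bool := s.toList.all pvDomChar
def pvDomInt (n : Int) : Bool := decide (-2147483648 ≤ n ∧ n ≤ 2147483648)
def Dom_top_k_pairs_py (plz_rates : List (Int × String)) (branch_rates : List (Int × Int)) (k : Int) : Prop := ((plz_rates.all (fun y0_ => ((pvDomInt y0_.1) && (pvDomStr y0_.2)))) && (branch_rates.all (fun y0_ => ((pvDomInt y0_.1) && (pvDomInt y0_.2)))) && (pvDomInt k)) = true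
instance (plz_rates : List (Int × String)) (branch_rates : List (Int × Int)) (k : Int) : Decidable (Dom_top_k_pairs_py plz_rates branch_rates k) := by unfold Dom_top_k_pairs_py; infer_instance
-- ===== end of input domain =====

-- B replaces A's binary heap by a flat list of live candidates with a linear min-scan per
-- extraction: a different data structure and extraction algorithm of similar overall cost.

-- Heap entries are Python's tuples (score, plz, branch_id, i, j).
abbrev Ent : Type := Int × String × Int × Int × Int

def dE : Ent := (0, "", 0, 0, 0)

-- xs[n] for a Nat index known to be in range (total form used by both ports)
def getE (h : List Ent) (n : Nat) : Ent := h.getD n dE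

-- Python '<' on strings: lexicographic comparison of code points (exact for all characters).
def clLt : List Char → List Char → Bool
  | [], [] => false
  | [], _ :: _ => true
  | _ :: _, [] => false
  | a :: as, b :: bs =>
    if a.toNat < b.toNat then true
    else if b.toNat < a.toNat then false
    else clLt as bs

-- Python '<' on the 5-tuples (int, str, int, int, int): lexicographic.
def entLt (a b : Ent) : Bool :=
  match a, b with
  | (s1, p1, b1, i1, j1), (s2, p2, b2, i2, j2) =>
    if s1 < s2 then true else if s2 < s1 then false
    else if clLt p1.toList p2.toList then true else if clLt p2.toList p1.toList then false
    else if b1 < b2 then true else if b2 < b1 then false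
    else if i1 < i2 then true else if i2 < i1 then false
    else decide (j1 < j2)

-- ===== PORT A =====  (faithful transcription of CPython's heapq._siftdown/_siftup/heappush/heappop)

-- heapq._siftdown(heap, startpos, pos) with newitem already read out of heap[pos]
def siftdown (heap : List Ent) (startpos pos : Nat) (newitem : Ent) : List Ent :=
  if _h : startpos < pos then
    let parent := (pos - 1) / 2
    let parentItem := getE heap parent
    if entLt newitem parentItem then
      siftdown (heap.set pos parentItem) startpos parent newitem
    else heap.set pos newitem
  else heap.set pos newitem
termination_by pos
decreasing_by omega

-- the child-chasing loop of heapq._siftup; returns the final hole position and the list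
def siftupLoop (heap : List Ent) (pos : Nat) : Nat × List Ent :=
  let endpos := heap.length
  let childpos := 2 * pos + 1
  if hc : childpos < endpos then
    let rightpos := childpos + 1
    let childpos2 :=
      if rightpos < endpos ∧ entLt (getE heap childpos) (getE heap rightpos) = false
      then rightpos else childpos
    siftupLoop (heap.set pos (getE heap childpos2)) childpos2
  else (pos, heap)
termination_by heap.length - pos
decreasing_by simp only [List.length_set]; split_ifs <;> omega

-- heapq._siftup(heap, pos)
def siftup (heap : List Ent) (pos : Nat) : List Ent :=
  let newitem := getE heap pos
  let r := siftupLoop heap pos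
  siftdown (r.2.set r.1 newitem) pos r.1 newitem

-- heapq.heappush
def heappush (heap : List Ent) (item : Ent) : List Ent :=
  siftdown (heap ++ [item]) 0 heap.length item

-- heapq.heappop; A only calls it on a nonempty heap (the [] arm is unreachable)
def heappop (heap : List Ent) : Ent × List Ent :=
  match heap.getLast? with
  | none => (dE, [])
  | some lastelt =>
    let rest := heap.dropLast
    match rest with
    | [] => (lastelt, [])
    | r0 :: _ => (r0, siftup (rest.set 0 lastelt) 0)

-- builds the tuple (score, plz, branch_id, i, j); mk realises A's 'if outer_is_branch' branch
-- choosing (plz, branch_id) from the outer/inner ids (str()/int() on str/int are identities)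
def mkEnt {γ δ : Type} (mk : γ → δ → String × Int) (o : Int × γ) (inn : Int × δ) (i j : Int) : Ent :=
  (o.1 * inn.1, (mk o.2 inn.2).1, (mk o.2 inn.2).2, i, j)

-- A's 'while h and len(out) < k' loop
def aLoop {γ δ : Type} (mk : γ → δ → String × Int) (outer : List (Int × γ)) (inner : List (Int × δ))
    (k : Int) (h : List Ent) (out : List (String × Int × Int)) : List (String × Int × Int) :=
  if hh : h ≠ [] ∧ (out.length : Int) < k then
    let pr := heappop h
    let r := pr.1
    let out' := out ++ [(r.2.1, r.2.2.1, r.1)]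
    let j2 := r.2.2.2.2 + 1
    let h'' :=
      if j2 < (inner.length : Int) then
        -- outer[i] / inner[j2]; both indices are always in range here (i comes from
        -- enumerate, 0 ≤ j and j2 < len(inner) was just checked), so the '_, _' arm
        -- is unreachable and only makes the port total
        match PySem.List.pyGet? outer r.2.2.2.1, PySem.List.pyGet? inner j2 with
        | some o, some inn => heappush pr.2 (mkEnt mk o inn r.2.2.2.1 j2)
        | _, _ => pr.2
      else pr.2
    aLoop mk outer inner k h'' out'
  else out
termination_by (k - (out.length : Int)).toNat
decreasing_by
  obtain ⟨-, hk⟩ := hh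
  refine (Int.toNat_lt_toNat (by omega)).mpr ?_
  simp only [List.length_append, List.length_cons, List.length_nil]
  push_cast; omega

-- A for one fixed orientation: build the heap by heappush over enumerate(outer), then pop
def aRun {γ δ : Type} (mk : γ → δ → String × Int) (outer : List (Int × γ)) (inner : List (Int × δ))
    (k : Int) : List (String × Int × Int) :=
  match inner with
  | [] => []   -- unreachable: caller guarantees inner ≠ []
  | i0 :: _ =>
    let h := outer.zipIdx.foldl (fun h oi => heappush h (mkEnt mk oi.1 i0 (oi.2 : Int) 0)) []
    aLoop mk outer inner k h []

def top_k_pairs_py (plz_rates : List (Int × String)) (branch_rates : List (Int × Int)) (k : Int) : List (String × Int × Int) :=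
  if plz_rates = [] ∨ branch_rates = [] ∨ k ≤ 0 then []
  else if branch_rates.length ≤ plz_rates.length then
    -- outer_is_branch: plz = str(iid), branch_id = int(oid)
    aRun (fun (oid : Int) (iid : String) => (iid, oid)) branch_rates plz_rates k
  else
    -- plz = str(oid), branch_id = int(iid)
    aRun (fun (oid : String) (iid : Int) => (oid, iid)) plz_rates branch_rates k

-- ===== PORT B =====  (no heap: flat candidate list, linear scan for the minimum tuple)

-- 't = 0; for idx, c in enumerate(cands): if c < cands[t]: t = idx'
def bArgmin (cs : List Ent) : Nat :=
  cs.zipIdx.foldl (fun t ci => if entLt ci.1 (getE cs t) then ci.2 else t) 0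

-- B's 'while cands and len(out) < k' loop
def bLoop {γ δ : Type} (mk : γ → δ → String × Int) (outer : List (Int × γ)) (inner : List (Int × δ))
    (k : Int) (cs : List Ent) (out : List (String × Int × Int)) : List (String × Int × Int) :=
  if hh : cs ≠ [] ∧ (out.length : Int) < k then
    let t := bArgmin cs
    let m := getE cs t
    let out' := out ++ [(m.2.1, m.2.2.1, m.1)]
    let j2 := m.2.2.2.2 + 1
    let cs' :=
      if j2 < (inner.length : Int) then
        -- cands[t] = new tuple; indices always in range here ('_, _' arm unreachable, totality only)
        match PySem.List.pyGet? outer m.2.2.2.1, PySem.List.pyGet? inner j2 with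
        | some o, some inn => cs.set t (mkEnt mk o inn m.2.2.2.1 j2)
        | _, _ => cs.eraseIdx t
      else cs.eraseIdx t   -- cands.pop(t)
    bLoop mk outer inner k cs' out'
  else out
termination_by (k - (out.length : Int)).toNat
decreasing_by
  obtain ⟨-, hk⟩ := hh
  refine (Int.toNat_lt_toNat (by omega)).mpr ?_
  simp only [List.length_append, List.length_cons, List.length_nil]
  push_cast; omega

-- B for one fixed orientation: candidate list built by append over enumerate(outer)
def bRun {γ δ : Type} (mk : γ → δ → String × Int) (outer : List (Int × γ)) (inner : List (Int × δ))
    (k : Int) : List (String × Int × Int) :=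
  match inner with
  | [] => []   -- unreachable: caller guarantees inner ≠ []
  | i0 :: _ =>
    let cs := outer.zipIdx.foldl (fun cs oi => cs ++ [mkEnt mk oi.1 i0 (oi.2 : Int) 0]) []
    bLoop mk outer inner k cs []

def top_k_pairs_py_alt (plz_rates : List (Int × String)) (branch_rates : List (Int × Int)) (k : Int) : List (String × Int × Int) :=
  if plz_rates = [] ∨ branch_rates = [] ∨ k ≤ 0 then []
  else if branch_rates.length ≤ plz_rates.length then
    bRun (fun (oid : Int) (iid : String) => (iid, oid)) branch_rates plz_rates k
  else
    bRun (fun (oid : String) (iid : Int) => (oid, iid)) plz_rates branch_rates k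

-- ===== PRECONDITION & SPEC =====
def Spec_top_k_pairs_py (plz_rates : List (Int × String)) (branch_rates : List (Int × Int)) (k : Int) (out : List (String × Int × Int)) : Prop := out = top_k_pairs_py_alt plz_rates branch_rates k
instance (plz_rates : List (Int × String)) (branch_rates : List (Int × Int)) (k : Int) (out : List (String × Int × Int)) : Decidable (Spec_top_k_pairs_py plz_rates branch_rates k out) := by unfold Spec_top_k_pairs_py; infer_instance

-- ===== CLAIM (what is proved, stated in full; the proofs are below) =====
def Claim_equal_top_k_pairs_py : Prop := ∀ (plz_rates : List (Int × String)) (branch_rates : List (Int × Int)) (k : Int), Dom_top_k_pairs_py plz_rates branch_rates k → Spec_top_k_pairs_py plz_rates branch_rates k (top_k_pairs_py plz_rates branch_rates k)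

-- ===== LEMMAS AND PROOFS =====

-- ---- the tuple order is a strict linear order ----
theorem clLt_irrefl (a : List Char) : clLt a a = false := by
  induction a with
  | nil => rfl
  | cons x xs ih => simp [clLt, ih]

theorem clLt_trans {a b c : List Char} (h1 : clLt a b = true) (h2 : clLt b c = true) :
    clLt a c = true := by
  induction a generalizing b c with
  | nil =>
    cases c with
    | nil => cases b <;> simp [clLt] at h1 h2
    | cons z zs => simp [clLt]
  | cons x xs ih =>
    cases b with
    | nil => simp [clLt] at h1
    | cons y ys =>
      cases c with
      | nil => simp [clLt] at h2
      | cons z zs =>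
        simp only [clLt] at h1 h2 ⊢
        split_ifs at h1 with ha hb
        · split_ifs at h2 with hc hd
          · rw [if_pos (by omega)]
          · rw [if_pos (by omega)]
        · split_ifs at h2 with hc hd
          · rw [if_pos (by omega)]
          · rw [if_neg (by omega), if_neg (by omega)]
            exact ih h1 h2

theorem clLt_conn {a b : List Char} (h1 : clLt a b = false) (h2 : clLt b a = false) : a = b := by
  induction a generalizing b with
  | nil => cases b with
    | nil => rfl
    | cons y ys => simp [clLt] at h1
  | cons x xs ih =>
    cases b with
    | nil => simp [clLt] at h2
    | cons y ys =>
      simp only [clLt, Char.toNat] at h1 h2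
      split_ifs at h1 with ha hb
      · rw [if_pos hb] at h2
        exact absurd h2 (by simp)
      · rw [if_neg hb, if_neg ha] at h2
        have hxy : x = y := Char.ext (UInt32.toNat_inj.mp (by omega))
        rw [hxy, ih h1 h2]

theorem entLt_irrefl (a : Ent) : entLt a a = false := by
  obtain ⟨s, p, b, i, j⟩ := a
  simp [entLt, clLt_irrefl]

-- one level of Python's lexicographic tuple comparison: transitivity
theorem lex_step_trans {β : Type} {lt : β → β → Prop} [DecidableRel lt]
    (hconn : ∀ x y : β, ¬ lt x y → ¬ lt y x → x = y)
    {p q r : β} {ra rb rc : Bool} (hrest : ra = true → rb = true → rc = true)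
    (htrans : ∀ {x y z : β}, lt x y → lt y z → lt x z)
    (h1 : (if lt p q then true else if lt q p then false else ra) = true)
    (h2 : (if lt q r then true else if lt r q then false else rb) = true) :
    (if lt p r then true else if lt r p then false else rc) = true := by
  split_ifs at h1 with ha hb
  · split_ifs at h2 with hc hd
    · rw [if_pos (htrans ha hc)]
    · have := hconn _ _ hc hd; subst this; rw [if_pos ha]
  · have := hconn _ _ ha hb; subst this
    split_ifs at h2 with hc hd
    · rw [if_pos hc]
    · rw [if_neg hc, if_neg hd]; exact hrest h1 h2

-- one level of Python's lexicographic tuple comparison: connectedness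
theorem lex_step_conn {β : Type} {lt : β → β → Prop} [DecidableRel lt]
    (hconn : ∀ x y : β, ¬ lt x y → ¬ lt y x → x = y)
    {p q : β} {ra rb : Bool}
    (h1 : (if lt p q then true else if lt q p then false else ra) = false)
    (h2 : (if lt q p then true else if lt p q then false else rb) = false) :
    p = q ∧ ra = false ∧ rb = false := by
  split_ifs at h1 with ha hb
  · rw [if_pos hb] at h2; exact absurd h2 (by simp)
  · rw [if_neg hb, if_neg ha] at h2
    exact ⟨hconn _ _ ha hb, h1, h2⟩

theorem strConn : ∀ x y : String, ¬ (clLt x.toList y.toList = true) →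
    ¬ (clLt y.toList x.toList = true) → x = y := fun _ _ hx hy =>
  String.toList_inj.mp (clLt_conn (by simpa using hx) (by simpa using hy))

theorem entLt_trans {a b c : Ent} (h1 : entLt a b = true) (h2 : entLt b c = true) :
    entLt a c = true := by
  obtain ⟨s1, p1, b1, i1, j1⟩ := a
  obtain ⟨s2, p2, b2, i2, j2⟩ := b
  obtain ⟨s3, p3, b3, i3, j3⟩ := c
  simp only [entLt] at h1 h2 ⊢
  refine lex_step_trans (fun x y hx hy => by omega) ?_ (fun hx hy => by omega) h1 h2
  intro g1 g2
  refine lex_step_trans strConn ?_ (fun hx hy => clLt_trans hx hy) g1 g2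
  intro g1 g2
  refine lex_step_trans (fun x y hx hy => by omega) ?_ (fun hx hy => by omega) g1 g2
  intro g1 g2
  refine lex_step_trans (fun x y hx hy => by omega) ?_ (fun hx hy => by omega) g1 g2
  intro g1 g2
  simp at *; omega

theorem entLt_conn {a b : Ent} (h1 : entLt a b = false) (h2 : entLt b a = false) : a = b := by
  obtain ⟨s1, p1, b1, i1, j1⟩ := a
  obtain ⟨s2, p2, b2, i2, j2⟩ := b
  simp only [entLt] at h1 h2
  obtain ⟨hs, h1, h2⟩ := lex_step_conn (fun x y hx hy => by omega) h1 h2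
  obtain ⟨hp, h1, h2⟩ := lex_step_conn strConn h1 h2
  obtain ⟨hb, h1, h2⟩ := lex_step_conn (fun x y hx hy => by omega) h1 h2
  obtain ⟨hi, h1, h2⟩ := lex_step_conn (fun x y hx hy => by omega) h1 h2
  have hj : j1 = j2 := by simp at h1 h2; omega
  simp [hs, hp, hb, hi, hj]

theorem entLt_asymm {a b : Ent} (h : entLt a b = true) : entLt b a = false := by
  by_contra hc
  have := entLt_trans h (eq_true_of_ne_false hc)
  simp [entLt_irrefl] at this

theorem entLe_trans {a b c : Ent} (h1 : entLt b a = false) (h2 : entLt c b = false) :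
    entLt c a = false := by
  by_contra hc
  have hca : entLt c a = true := eq_true_of_ne_false hc
  by_cases hbc : entLt b c = true
  · exact absurd (entLt_trans hbc hca) (by simp [h1])
  · have : b = c := entLt_conn (Bool.not_eq_true _ ▸ hbc) h2
    subst this; simp [hca] at h1

-- ---- permutation helpers for set / eraseIdx ----
theorem set_perm (h : List Ent) (n : Nat) (hn : n < h.length) (a : Ent) :
    (h.set n a).Perm (a :: h.eraseIdx n) := by
  rw [List.set_eq_take_cons_drop a hn, List.eraseIdx_eq_take_drop_succ]
  exact List.perm_middle

theorem perm_getE_cons_eraseIdx (h : List Ent) (n : Nat) (hn : n < h.length) :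
    h.Perm (getE h n :: h.eraseIdx n) := by
  have : getE h n = h[n] := by simp [getE, List.getD_eq_getElem?_getD, List.getElem?_eq_getElem hn]
  rw [this, List.eraseIdx_eq_take_drop_succ]
  conv_lhs => rw [← List.take_append_drop n h, List.drop_eq_getElem_cons hn]
  exact List.perm_middle

theorem getE_set_self (h : List Ent) (n : Nat) (a : Ent) (hn : n < h.length) :
    getE (h.set n a) n = a := by
  simp [getE, List.getD_eq_getElem?_getD, hn]

theorem getE_set_ne (h : List Ent) (n j : Nat) (a : Ent) (hne : j ≠ n) :
    getE (h.set n a) j = getE h j := by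
  simp [getE, List.getD_eq_getElem?_getD, (Ne.symm hne : n ≠ j)]

theorem eraseIdx_set_self (h : List Ent) (n : Nat) (a : Ent) :
    (h.set n a).eraseIdx n = h.eraseIdx n := by
  exact List.eraseIdx_set_eq

theorem erase_set_perm (h : List Ent) (i j : Nat) (hi : i < h.length) (hj : j < h.length)
    (hne : j ≠ i) : ((h.set i (getE h j)).eraseIdx j).Perm (h.eraseIdx i) := by
  have h1 : (h.set i (getE h j)).Perm (getE h j :: h.eraseIdx i) := set_perm h i hi _
  have h2 : (h.set i (getE h j)).Perm
      (getE (h.set i (getE h j)) j :: (h.set i (getE h j)).eraseIdx j) :=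
    perm_getE_cons_eraseIdx _ j (by simpa using hj)
  rw [getE_set_ne h i j _ hne] at h2
  exact (h2.symm.trans h1).cons_inv

-- ---- heap invariants ----

-- all parent links hold: heap[parent j] <= heap[j]
def HeapOrd (h : List Ent) : Prop :=
  ∀ j, 0 < j → j < h.length → entLt (getE h j) (getE h ((j - 1) / 2)) = false

-- all parent links hold except those into or out of the hole `pos`
def Links (h : List Ent) (pos : Nat) : Prop :=
  ∀ j, 0 < j → j < h.length → j ≠ pos → (j - 1) / 2 ≠ pos →
    entLt (getE h j) (getE h ((j - 1) / 2)) = false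

-- children of the hole are >= x
def ChildGE (h : List Ent) (pos : Nat) (x : Ent) : Prop :=
  ∀ j, 0 < j → j < h.length → (j - 1) / 2 = pos → entLt (getE h j) x = false

-- children of the hole are >= the hole's parent (when the hole is not the root)
def GrandGE (h : List Ent) (pos : Nat) : Prop :=
  ∀ j, 0 < j → j < h.length → (j - 1) / 2 = pos → 0 < pos →
    entLt (getE h j) (getE h ((pos - 1) / 2)) = false

theorem siftdown_ord : ∀ (pos : Nat) (h : List Ent) (x : Ent), pos < h.length →
    Links h pos → ChildGE h pos x → GrandGE h pos → HeapOrd (siftdown h 0 pos x) := by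
  intro pos
  induction pos using Nat.strong_induction_on with
  | _ pos ih =>
    intro h x hlen hL hC hG
    rw [siftdown]
    by_cases hp : 0 < pos
    · rw [dif_pos hp]
      dsimp only
      by_cases hcmp : entLt x (getE h ((pos - 1) / 2)) = true
      · rw [if_pos hcmp]
        set p := (pos - 1) / 2 with hpdef
        have hplt : p < pos := by omega
        refine ih p hplt (h.set pos (getE h p)) x (by simp only [List.length_set]; omega)
          ?_ ?_ ?_
        · -- Links (h.set pos (getE h p)) p
          intro j hj0 hjlen hjp hparp
          simp only [List.length_set] at hjlen
          rcases eq_or_ne j pos with hje | hjpos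
          · omega
          · rw [getE_set_ne h pos j _ hjpos]
            rcases eq_or_ne ((j - 1) / 2) pos with hpar | hpar
            · rw [hpar, getE_set_self h pos _ hlen]
              exact hG j hj0 hjlen (by omega) hp
            · rw [getE_set_ne h pos _ _ hpar]
              exact hL j hj0 hjlen hjpos hpar
        · -- ChildGE (h.set pos (getE h p)) p x
          intro j hj0 hjlen hjpar
          simp only [List.length_set] at hjlen
          rcases eq_or_ne j pos with hje | hjpos
          · rw [hje, getE_set_self h pos _ hlen]
            exact entLt_asymm hcmp
          · rw [getE_set_ne h pos j _ hjpos]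
            by_contra hbad
            have hbad' : entLt (getE h j) x = true := eq_true_of_ne_false hbad
            have := entLt_trans hbad' hcmp
            have hLj := hL j hj0 hjlen hjpos (by omega)
            rw [hjpar] at hLj
            simp [this] at hLj
        · -- GrandGE (h.set pos (getE h p)) p
          intro j hj0 hjlen hjpar hp0
          simp only [List.length_set] at hjlen
          have hgp : (p - 1) / 2 ≠ pos := by omega
          rw [getE_set_ne h pos _ _ hgp]
          rcases eq_or_ne j pos with hje | hjpos
          · rw [hje, getE_set_self h pos _ hlen]
            exact hL p (by omega) (by omega) (by omega) (by omega)
          · rw [getE_set_ne h pos j _ hjpos]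
            exact entLe_trans (hL p (by omega) (by omega) (by omega) (by omega))
              (by have := hL j hj0 hjlen hjpos (by omega); rwa [hjpar] at this)
      · rw [if_neg hcmp]
        intro j hj0 hjlen
        simp only [List.length_set] at hjlen
        rcases eq_or_ne j pos with hje | hjpos
        · rw [hje, getE_set_self h pos _ hlen, getE_set_ne h pos _ _ (by omega)]
          exact Bool.eq_false_iff.mpr hcmp
        · rw [getE_set_ne h pos j _ hjpos]
          rcases eq_or_ne ((j - 1) / 2) pos with hpar | hpar
          · rw [hpar, getE_set_self h pos _ hlen]
            exact hC j hj0 hjlen hpar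
          · rw [getE_set_ne h pos _ _ hpar]
            exact hL j hj0 hjlen hjpos hpar
    · rw [dif_neg hp]
      have hpos0 : pos = 0 := by omega
      subst hpos0
      intro j hj0 hjlen
      simp only [List.length_set] at hjlen
      rw [getE_set_ne h 0 j _ (by omega)]
      rcases eq_or_ne ((j - 1) / 2) 0 with hpar | hpar
      · rw [hpar, getE_set_self h 0 _ hlen]
        exact hC j hj0 hjlen hpar
      · rw [getE_set_ne h 0 _ _ hpar]
        exact hL j hj0 hjlen (by omega) hpar

theorem siftdown_perm : ∀ (pos : Nat) (h : List Ent) (x : Ent), pos < h.length →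
    (siftdown h 0 pos x).Perm (x :: h.eraseIdx pos) := by
  intro pos
  induction pos using Nat.strong_induction_on with
  | _ pos ih =>
    intro h x hlen
    rw [siftdown]
    by_cases hp : 0 < pos
    · rw [dif_pos hp]
      dsimp only
      by_cases hcmp : entLt x (getE h ((pos - 1) / 2)) = true
      · rw [if_pos hcmp]
        have hplt : (pos - 1) / 2 < pos := by omega
        have hperm := ih _ hplt (h.set pos (getE h ((pos - 1) / 2))) x
          (by simp only [List.length_set]; omega)
        exact hperm.trans
          ((erase_set_perm h pos ((pos - 1) / 2) hlen (by omega) (by omega)).cons x)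
      · rw [if_neg hcmp]
        exact set_perm h pos hlen x
    · rw [dif_neg hp]
      exact set_perm h pos hlen x

def LoopSpec (h0 h : List Ent) (pos0 pos : Nat) : Prop :=
  (siftupLoop h pos).2.length = h0.length ∧ (siftupLoop h pos).1 < h0.length ∧
  h0.length ≤ 2 * (siftupLoop h pos).1 + 1 ∧
  ((siftupLoop h pos).2.eraseIdx (siftupLoop h pos).1).Perm (h0.eraseIdx pos0) ∧
  Links (siftupLoop h pos).2 (siftupLoop h pos).1 ∧
  GrandGE (siftupLoop h pos).2 (siftupLoop h pos).1

-- one step of the child-chasing loop preserves the invariants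
theorem siftupLoop_step (n : Nat)
    (ih : ∀ m, m < n → ∀ (h : List Ent) (pos : Nat), h.length - pos = m → pos < h.length →
      Links h pos → GrandGE h pos → LoopSpec h h pos pos)
    (h : List Ent) (pos : Nat) (hn : h.length - pos = n) (hlen : pos < h.length)
    (hL : Links h pos) (hG : GrandGE h pos) (c2 : Nat)
    (hposc2 : pos < c2) (hc2len : c2 < h.length) (hc2par : (c2 - 1) / 2 = pos)
    (minchild : ∀ s, 0 < s → s < h.length → (s - 1) / 2 = pos →
      entLt (getE h s) (getE h c2) = false) :
    LoopSpec h (h.set pos (getE h c2)) pos c2 := by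
  have hlen' : (h.set pos (getE h c2)).length = h.length := by
    simp only [List.length_set]
  have hLinks' : Links (h.set pos (getE h c2)) c2 := by
    intro j hj0 hjlen hjc2 hparc2
    rw [hlen'] at hjlen
    rcases eq_or_ne j pos with hje | hjpos
    · rw [hje, getE_set_self h pos _ hlen]
      have hp0 : 0 < pos := by omega
      rw [getE_set_ne h pos _ _ (by omega : (pos - 1) / 2 ≠ pos)]
      exact hG c2 (by omega) hc2len hc2par hp0
    · rw [getE_set_ne h pos j _ hjpos]
      rcases eq_or_ne ((j - 1) / 2) pos with hpar | hpar
      · rw [hpar, getE_set_self h pos _ hlen]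
        exact minchild j hj0 hjlen hpar
      · rw [getE_set_ne h pos _ _ hpar]
        exact hL j hj0 hjlen hjpos hpar
  have hGrand' : GrandGE (h.set pos (getE h c2)) c2 := by
    intro j hj0 hjlen hjpar _
    rw [hlen'] at hjlen
    have hjne : j ≠ pos := by omega
    rw [hc2par, getE_set_self h pos _ hlen, getE_set_ne h pos j _ hjne]
    have := hL j hj0 hjlen hjne (by omega)
    rwa [hjpar] at this
  obtain ⟨L1, L2, L3, L4, L5, L6⟩ :=
    ih ((h.set pos (getE h c2)).length - c2) (by rw [hlen']; omega)
      (h.set pos (getE h c2)) c2 rfl (by rw [hlen']; exact hc2len) hLinks' hGrand'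
  rw [hlen'] at L1 L2 L3
  refine ⟨L1, L2, L3, ?_, L5, L6⟩
  exact L4.trans (erase_set_perm h pos c2 hlen hc2len (by omega))

theorem siftupLoop_spec : ∀ (h : List Ent) (pos : Nat), pos < h.length →
    Links h pos → GrandGE h pos → LoopSpec h h pos pos := by
  suffices H : ∀ (n : Nat) (h : List Ent) (pos : Nat), h.length - pos = n → pos < h.length →
      Links h pos → GrandGE h pos → LoopSpec h h pos pos by
    intro h pos hlen hL hG
    exact H (h.length - pos) h pos rfl hlen hL hG
  intro n
  induction n using Nat.strong_induction_on with
  | _ n ih =>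
    intro h pos hn hlen hL hG
    unfold LoopSpec
    rw [siftupLoop]
    dsimp only
    by_cases hc : 2 * pos + 1 < h.length
    · rw [dif_pos hc]
      by_cases hcond : 2 * pos + 1 + 1 < h.length ∧
          entLt (getE h (2 * pos + 1)) (getE h (2 * pos + 1 + 1)) = false
      · rw [if_pos hcond]
        have minchild : ∀ s, 0 < s → s < h.length → (s - 1) / 2 = pos →
            entLt (getE h s) (getE h (2 * pos + 1 + 1)) = false := by
          intro s hs0 hslen hspar
          have : s = 2 * pos + 1 ∨ s = 2 * pos + 1 + 1 := by omega
          rcases this with rfl | rfl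
          · exact hcond.2
          · exact entLt_irrefl _
        exact siftupLoop_step n ih h pos hn hlen hL hG (2 * pos + 1 + 1) (by omega)
          hcond.1 (by omega) minchild
      · rw [if_neg hcond]
        have minchild : ∀ s, 0 < s → s < h.length → (s - 1) / 2 = pos →
            entLt (getE h s) (getE h (2 * pos + 1)) = false := by
          intro s hs0 hslen hspar
          have : s = 2 * pos + 1 ∨ s = 2 * pos + 1 + 1 := by omega
          rcases this with rfl | rfl
          · exact entLt_irrefl _
          · rcases Decidable.not_and_iff_or_not.mp hcond with hr | hltf
            · omega
            · exact entLt_asymm (eq_true_of_ne_false hltf)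
        exact siftupLoop_step n ih h pos hn hlen hL hG (2 * pos + 1) (by omega)
          hc (by omega) minchild
    · rw [dif_neg hc]
      exact ⟨rfl, hlen, by omega, List.Perm.refl _, hL, hG⟩

theorem getE_eq_getElem (h : List Ent) (n : Nat) (hn : n < h.length) : getE h n = h[n] := by
  simp [getE, List.getD_eq_getElem?_getD, List.getElem?_eq_getElem hn]

theorem getE_append_lt (h : List Ent) (a : Ent) (j : Nat) (hj : j < h.length) :
    getE (h ++ [a]) j = getE h j := by
  rw [getE_eq_getElem _ j (by simp; omega), getE_eq_getElem _ j hj]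
  exact List.getElem_append_left hj

theorem getE_dropLast (h : List Ent) (j : Nat) (hj : j < h.dropLast.length) :
    getE h.dropLast j = getE h j := by
  rw [getE_eq_getElem _ j hj, getE_eq_getElem _ j (by simp at hj; omega)]
  exact List.getElem_dropLast hj

theorem siftup_spec (h : List Ent) (hne : h ≠ []) (hL : Links h 0) :
    HeapOrd (siftup h 0) ∧ (siftup h 0).Perm h := by
  have hlen0 : 0 < h.length := List.length_pos_iff.mpr hne
  have hG : GrandGE h 0 := fun j _ _ _ hp0 => absurd hp0 (by omega)
  have hspec := siftupLoop_spec h 0 hlen0 hL hG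
  unfold LoopSpec at hspec
  obtain ⟨L1, L2, L3, L4, L5, L6⟩ := hspec
  rw [siftup]
  set r := siftupLoop h 0 with hr
  set x := getE h 0 with hx
  have hsetlen : (r.2.set r.1 x).length = h.length := by simp [L1]
  have hord : HeapOrd (siftdown (r.2.set r.1 x) 0 r.1 x) := by
    refine siftdown_ord r.1 (r.2.set r.1 x) x (by omega) ?_ ?_ ?_
    · intro j hj0 hjlen hjne hpar
      rw [hsetlen] at hjlen
      rw [getE_set_ne _ _ _ _ hjne, getE_set_ne _ _ _ _ hpar]
      exact L5 j hj0 (by omega) hjne hpar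
    · intro j hj0 hjlen hjpar
      rw [hsetlen] at hjlen
      omega
    · intro j hj0 hjlen hjpar hp0
      rw [hsetlen] at hjlen
      omega
  refine ⟨hord, ?_⟩
  have hperm := siftdown_perm r.1 (r.2.set r.1 x) x (by omega)
  rw [eraseIdx_set_self] at hperm
  exact hperm.trans ((L4.cons x).trans (perm_getE_cons_eraseIdx h 0 hlen0).symm)

theorem heapOrd_root_min (h : List Ent) (hOrd : HeapOrd h) :
    ∀ j, j < h.length → entLt (getE h j) (getE h 0) = false := by
  intro j
  induction j using Nat.strong_induction_on with
  | _ j ih =>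
    intro hj
    rcases Nat.eq_zero_or_pos j with rfl | hpos
    · simp [entLt_irrefl]
    · exact entLe_trans (ih ((j-1)/2) (by omega) (by omega)) (hOrd j hpos hj)

theorem heappush_spec (h : List Ent) (item : Ent) (hOrd : HeapOrd h) :
    HeapOrd (heappush h item) ∧ (heappush h item).Perm (item :: h) := by
  rw [heappush]
  have hlen : h.length < (h ++ [item]).length := by simp
  have hLinks : Links (h ++ [item]) h.length := by
    intro j hj0 hjlen hjne hpar
    simp only [List.length_append, List.length_cons, List.length_nil] at hjlen
    have hjlt : j < h.length := by omega
    rw [getE_append_lt h item j hjlt, getE_append_lt h item _ (by omega)]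
    exact hOrd j hj0 hjlt
  have hChild : ChildGE (h ++ [item]) h.length item := by
    intro j hj0 hjlen hjpar
    simp only [List.length_append, List.length_cons, List.length_nil] at hjlen
    omega
  have hGrand : GrandGE (h ++ [item]) h.length := by
    intro j hj0 hjlen hjpar _
    simp only [List.length_append, List.length_cons, List.length_nil] at hjlen
    omega
  refine ⟨siftdown_ord h.length (h ++ [item]) item hlen hLinks hChild hGrand, ?_⟩
  have hperm := siftdown_perm h.length (h ++ [item]) item hlen
  rwa [show (h ++ [item]).eraseIdx h.length = h by
    simp [List.eraseIdx_eq_take_drop_succ]] at hperm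

theorem heappop_fst (h : List Ent) (hne : h ≠ []) : (heappop h).1 = getE h 0 := by
  rw [heappop]
  cases hlast : h.getLast? with
  | none => exact absurd (List.getLast?_eq_none_iff.mp hlast) hne
  | some lastelt =>
    cases hrest : h.dropLast with
    | nil =>
      have hh : h = [lastelt] := by
        conv_lhs => rw [← List.dropLast_concat_getLast hne]
        rw [List.getLast_of_mem_getLast? hlast, hrest]
        rfl
      rw [hh]; rfl
    | cons r0 t =>
      have h0 : getE h 0 = r0 := by
        rw [← getE_dropLast h 0 (by rw [hrest]; simp), hrest]
        rfl
      rw [h0]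

theorem heappop_spec (h : List Ent) (hne : h ≠ []) (hOrd : HeapOrd h) :
    HeapOrd (heappop h).2 ∧ h.Perm ((heappop h).1 :: (heappop h).2) ∧
    ∀ x ∈ h, entLt x (heappop h).1 = false := by
  have hmin : ∀ x ∈ h, entLt x (heappop h).1 = false := by
    intro x hx
    obtain ⟨j, hj, rfl⟩ := List.mem_iff_getElem.mp hx
    rw [heappop_fst h hne, ← getE_eq_getElem h j hj]
    exact heapOrd_root_min h hOrd j hj
  suffices hcore : HeapOrd (heappop h).2 ∧ h.Perm ((heappop h).1 :: (heappop h).2) from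
    ⟨hcore.1, hcore.2, hmin⟩
  rw [heappop]
  cases hlast : h.getLast? with
  | none => exact absurd (List.getLast?_eq_none_iff.mp hlast) hne
  | some lastelt =>
    cases hrest : h.dropLast with
    | nil =>
      have hh : h = [lastelt] := by
        conv_lhs => rw [← List.dropLast_concat_getLast hne]
        rw [List.getLast_of_mem_getLast? hlast, hrest]
        rfl
      constructor
      · intro j hj0 hjlen
        simp at hjlen
      · rw [hh]
    | cons r0 t =>
      have hrne : (h.dropLast.set 0 lastelt) ≠ [] := by rw [hrest]; simp
      have hLinks : Links (h.dropLast.set 0 lastelt) 0 := by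
        intro j hj0 hjlen hjne hpar
        simp only [List.length_set] at hjlen
        rw [getE_set_ne _ _ _ _ hjne, getE_set_ne _ _ _ _ hpar,
          getE_dropLast h j hjlen, getE_dropLast h _ (by omega)]
        exact hOrd j hj0 (by simp at hjlen ⊢; omega)
      obtain ⟨hOrd', hPerm'⟩ := siftup_spec _ hrne hLinks
      dsimp only
      rw [hrest] at hOrd' hPerm'
      refine ⟨hOrd', ?_⟩
      have hset : ((r0 :: t).set 0 lastelt) = lastelt :: t := rfl
      rw [hset] at hPerm'
      have hsplit : h = r0 :: (t ++ [lastelt]) := by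
        conv_lhs => rw [← List.dropLast_concat_getLast hne]
        rw [List.getLast_of_mem_getLast? hlast, hrest]
        rfl
      conv_lhs => rw [hsplit]
      exact ((List.perm_append_singleton lastelt t).trans hPerm'.symm).cons r0

-- ---- B's scan finds the minimum ----
theorem argmin_fold (cs : List Ent) : ∀ (ps : List (Ent × Nat)),
    (∀ p ∈ ps, p.2 < cs.length ∧ p.1 = getE cs p.2) → ∀ t0, t0 < cs.length →
    (ps.foldl (fun t ci => if entLt ci.1 (getE cs t) then ci.2 else t) t0) < cs.length ∧
    (∀ p ∈ ps, entLt p.1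
      (getE cs (ps.foldl (fun t ci => if entLt ci.1 (getE cs t) then ci.2 else t) t0)) = false) ∧
    entLt (getE cs t0)
      (getE cs (ps.foldl (fun t ci => if entLt ci.1 (getE cs t) then ci.2 else t) t0)) = false := by
  intro ps
  induction ps with
  | nil =>
    intro _ t0 ht0
    exact ⟨ht0, by simp, entLt_irrefl _⟩
  | cons p ps ih =>
    intro hp t0 ht0
    simp only [List.foldl_cons]
    by_cases hcmp : entLt p.1 (getE cs t0) = true
    · rw [if_pos hcmp]
      have hps : p.2 < cs.length ∧ p.1 = getE cs p.2 := hp p (by simp)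
      obtain ⟨R1, R2, R3⟩ := ih (fun q hq => hp q (by simp [hq])) p.2 hps.1
      rw [← hps.2] at R3
      refine ⟨R1, ?_, ?_⟩
      · intro q hq
        rcases List.mem_cons.mp hq with hqe | hq'
        · rw [hqe]; exact R3
        · exact R2 q hq'
      · by_contra hbad
        have := entLt_trans hcmp (eq_true_of_ne_false hbad)
        simp [this] at R3
    · rw [if_neg hcmp]
      have hf : entLt p.1 (getE cs t0) = false := Bool.eq_false_iff.mpr hcmp
      obtain ⟨R1, R2, R3⟩ := ih (fun q hq => hp q (by simp [hq])) t0 ht0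
      refine ⟨R1, ?_, R3⟩
      intro q hq
      rcases List.mem_cons.mp hq with hqe | hq'
      · rw [hqe]; exact entLe_trans R3 hf
      · exact R2 q hq'

theorem bArgmin_spec (cs : List Ent) (hne : cs ≠ []) :
    bArgmin cs < cs.length ∧ ∀ x ∈ cs, entLt x (getE cs (bArgmin cs)) = false := by
  have hp : ∀ p ∈ cs.zipIdx, p.2 < cs.length ∧ p.1 = getE cs p.2 := by
    intro p hpm
    have := List.mem_zipIdx_iff_getElem?.mp hpm
    have hlt : p.2 < cs.length := by
      by_contra hge
      rw [List.getElem?_eq_none_iff.mpr (by omega)] at this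
      simp at this
    refine ⟨hlt, ?_⟩
    rw [getE_eq_getElem cs p.2 hlt]
    rw [List.getElem?_eq_getElem hlt] at this
    exact (Option.some.inj this).symm
  obtain ⟨R1, R2, _⟩ := argmin_fold cs cs.zipIdx hp 0 (List.length_pos_iff.mpr hne)
  refine ⟨R1, ?_⟩
  intro x hx
  obtain ⟨i, hi, hxi⟩ := List.mem_iff_getElem.mp hx
  have hmem : (x, i) ∈ cs.zipIdx :=
    List.mem_zipIdx_iff_getElem?.mpr (by rw [List.getElem?_eq_getElem hi, hxi])
  exact R2 (x, i) hmem

-- ---- the two loops agree ----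
theorem loops_eq {γ δ : Type} (mk : γ → δ → String × Int) (outer : List (Int × γ))
    (inner : List (Int × δ)) (k : Int) :
    ∀ (n : Nat) (h cs : List Ent) (out : List (String × Int × Int)),
      n = (k - (out.length : Int)).toNat → HeapOrd h → h.Perm cs →
      aLoop mk outer inner k h out = bLoop mk outer inner k cs out := by
  intro n
  induction n with
  | zero =>
    intro h cs out hn _ _
    rw [aLoop, bLoop, dif_neg, dif_neg]
    · rintro ⟨-, hlt⟩; omega
    · rintro ⟨-, hlt⟩; omega
  | succ n ih =>
    intro h cs out hn hOrd hperm
    rw [aLoop, bLoop]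
    by_cases hcond : h ≠ [] ∧ (out.length : Int) < k
    · have hcsne : cs ≠ [] := by
        intro hc
        apply hcond.1
        have := hperm.length_eq
        rw [hc] at this
        exact List.length_eq_zero_iff.mp this
      rw [dif_pos hcond, dif_pos ⟨hcsne, hcond.2⟩]
      dsimp only
      obtain ⟨hne, hlt⟩ := hcond
      obtain ⟨hOrd', hperm', hmin⟩ := heappop_spec h hne hOrd
      obtain ⟨ht, hbmin⟩ := bArgmin_spec cs hcsne
      have hmem_m_h : getE cs (bArgmin cs) ∈ h := by
        rw [getE_eq_getElem cs _ ht]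
        exact hperm.mem_iff.mpr (List.getElem_mem ht)
      have hmem_r_cs : (heappop h).1 ∈ cs := by
        apply hperm.mem_iff.mp
        apply hperm'.mem_iff.mpr
        exact List.mem_cons_self
      have hrm : (heappop h).1 = getE cs (bArgmin cs) :=
        entLt_conn (hbmin _ hmem_r_cs) (hmin _ hmem_m_h)
      rw [← hrm]
      have hpop_erase : (heappop h).2.Perm (cs.eraseIdx (bArgmin cs)) := by
        have hchain : ((heappop h).1 :: (heappop h).2).Perm
            (getE cs (bArgmin cs) :: cs.eraseIdx (bArgmin cs)) :=
          (hperm'.symm.trans hperm).trans (perm_getE_cons_eraseIdx cs _ ht)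
        rw [← hrm] at hchain
        exact hchain.cons_inv
      have hn' : n = (k - ((out ++ [((heappop h).1.2.1, (heappop h).1.2.2.1, (heappop h).1.1)]).length : Int)).toNat := by
        simp only [List.length_append, List.length_cons, List.length_nil]
        push_cast
        omega
      by_cases hj2 : ((heappop h).1.2.2.2.2 + 1) < (inner.length : Int)
      · rw [if_pos hj2, if_pos hj2]
        cases ho : PySem.List.pyGet? outer (heappop h).1.2.2.2.1 with
        | none =>
          cases hi : PySem.List.pyGet? inner ((heappop h).1.2.2.2.2 + 1) with
          | none => exact ih _ _ _ hn' hOrd' hpop_erase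
          | some inn => exact ih _ _ _ hn' hOrd' hpop_erase
        | some o =>
          cases hi : PySem.List.pyGet? inner ((heappop h).1.2.2.2.2 + 1) with
          | none => exact ih _ _ _ hn' hOrd' hpop_erase
          | some inn =>
            obtain ⟨hpushOrd, hpushPerm⟩ := heappush_spec (heappop h).2
              (mkEnt mk o inn (heappop h).1.2.2.2.1 ((heappop h).1.2.2.2.2 + 1)) hOrd'
            refine ih _ _ _ hn' hpushOrd ?_
            refine hpushPerm.trans ?_
            refine ((hpop_erase.cons _).trans ?_)
            exact (set_perm cs (bArgmin cs) ht _).symm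
      · rw [if_neg hj2, if_neg hj2]
        exact ih _ _ _ hn' hOrd' hpop_erase
    · have hcond' : ¬ (cs ≠ [] ∧ (out.length : Int) < k) := by
        rintro ⟨hcs, hlt⟩
        apply hcond
        refine ⟨?_, hlt⟩
        intro hh
        apply hcs
        have := hperm.length_eq
        rw [hh] at this
        exact List.length_eq_zero_iff.mp this.symm
      rw [dif_neg hcond, dif_neg hcond']

theorem heapOrd_nil : HeapOrd [] := by
  intro j hj0 hjlen
  simp at hjlen

theorem fold_push_spec : ∀ (es : List Ent) (h0 : List Ent), HeapOrd h0 →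
    HeapOrd (es.foldl heappush h0) ∧ (es.foldl heappush h0).Perm (h0 ++ es) := by
  intro es
  induction es with
  | nil => intro h0 h0ord; exact ⟨h0ord, by simp⟩
  | cons e es ihe =>
    intro h0 h0ord
    obtain ⟨hpord, hpperm⟩ := heappush_spec h0 e h0ord
    obtain ⟨hord, hperm⟩ := ihe (heappush h0 e) hpord
    refine ⟨hord, ?_⟩
    simp only [List.foldl_cons]
    exact (hperm.trans (hpperm.append_right es)).trans List.perm_middle.symm

theorem run_eq {γ δ : Type} (mk : γ → δ → String × Int) (outer : List (Int × γ))
    (inner : List (Int × δ)) (k : Int) : aRun mk outer inner k = bRun mk outer inner k := by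
  rw [aRun.eq_def, bRun.eq_def]
  cases inner with
  | nil => rfl
  | cons i0 t =>
    dsimp only
    have hmapA : outer.zipIdx.foldl (fun h oi => heappush h (mkEnt mk oi.1 i0 (oi.2 : Int) 0)) []
        = (outer.zipIdx.map (fun oi => mkEnt mk oi.1 i0 (oi.2 : Int) 0)).foldl heappush [] := by
      rw [List.foldl_map]
    have hmapB : outer.zipIdx.foldl (fun cs oi => cs ++ [mkEnt mk oi.1 i0 (oi.2 : Int) 0]) []
        = (outer.zipIdx.map (fun oi => mkEnt mk oi.1 i0 (oi.2 : Int) 0)).foldl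
            (fun acc x => acc ++ [x]) [] := by
      rw [List.foldl_map]
    obtain ⟨hord, hperm⟩ :=
      fold_push_spec (outer.zipIdx.map (fun oi => mkEnt mk oi.1 i0 (oi.2 : Int) 0)) [] heapOrd_nil
    rw [hmapA, hmapB, PySem.List.foldl_append_singleton]
    refine loops_eq mk outer (i0 :: t) k (k - 0).toNat _ _ [] (by simp) hord ?_
    simpa using hperm

-- ===== VERDICT (by name: the statement is the Claim_ definition above) =====
theorem top_k_pairs_py_spec : Claim_equal_top_k_pairs_py := by
  intro plz_rates branch_rates k _
  unfold Spec_top_k_pairs_py top_k_pairs_py top_k_pairs_py_alt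
  split_ifs <;> simp [run_eq]
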